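-- pv_equiv track=rewrite | github.com/broberr/STMProject | STMproject/video_stm_activity/src/run_infer.py | pick_closest_label
-- ===== SOURCE A (Python) =====
-- ALLOWED_LABELS = ["meeting", "phone_use", "eating_drinking", "video_call", "using_computer"]
--
-- def pick_closest_label(scores: dict) -> str:
--     # keep allowed only
--     scores = {k: v for k, v in scores.items() if k in ALLOWED_LABELS}
--
--     best_label, best_score = max(scores.items(), key=lambda kv: kv[1])
--
--     # if absolutely no signal, choose safest generic label
--     if best_score == 0:
--         return "using_computer"
--
--     # tie-break: prefer more specific intents
--     specificity_order = ["video_call", "phone_use", "eating_drinking", "meeting", "using_computer"]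
--
--     tied = [k for k, v in scores.items() if v == best_score]
--     for lab in specificity_order:
--         if lab in tied:
--             return lab
--
--     return best_label
-- ===== SOURCE B (Python) =====
-- ALLOWED_LABELS = ["meeting", "phone_use", "eating_drinking", "video_call", "using_computer"]
-- SPECIFICITY_ORDER = ["video_call", "phone_use", "eating_drinking", "meeting", "using_computer"]
-- PRIORITY = {lab: i for i, lab in enumerate(SPECIFICITY_ORDER)}
--
--
-- def pick_closest_label(scores: dict) -> str:
--     # keep allowed only
--     filtered = {k: v for k, v in scores.items() if k in ALLOWED_LABELS}
--
--     # single pass: best score, ties broken toward the most specific label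
--     best_label, best_score = max(filtered.items(),
--                                  key=lambda kv: (kv[1], -PRIORITY[kv[0]]))
--
--     # if absolutely no signal, choose safest generic label
--     if best_score == 0:
--         return "using_computer"
--
--     return best_label
-- ===== Notes on version B (the rewrite author's own statement) =====
-- stated objective: simpler
-- what changed: Replaces A's tied-candidate list plus the scan over specificity_order with a single max over the filtered items using a composite (score, -priority) key; the zero-score guard stays a separate check.
import Mathlib
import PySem

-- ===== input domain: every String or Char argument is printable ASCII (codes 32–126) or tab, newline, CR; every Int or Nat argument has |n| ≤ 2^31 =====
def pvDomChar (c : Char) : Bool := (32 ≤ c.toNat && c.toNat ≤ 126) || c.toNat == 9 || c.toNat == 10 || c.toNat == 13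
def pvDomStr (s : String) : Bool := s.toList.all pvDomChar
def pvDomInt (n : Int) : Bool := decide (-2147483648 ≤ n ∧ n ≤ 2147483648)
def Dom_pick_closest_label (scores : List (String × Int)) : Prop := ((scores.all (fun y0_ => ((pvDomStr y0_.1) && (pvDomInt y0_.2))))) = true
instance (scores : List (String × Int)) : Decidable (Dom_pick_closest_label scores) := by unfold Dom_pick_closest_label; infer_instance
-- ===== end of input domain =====

-- B replaces A's tied-list + specificity_order scan by one max with a composite (score, -priority) key; same return value (objective: simpler).
-- The Python parameter is a dict; the association list is converted dict-style first (later duplicates overwrite the value, first position kept).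

-- ===== PORT A =====
def ALLOWED_LABELS : List String := ["meeting", "phone_use", "eating_drinking", "video_call", "using_computer"]

-- dict(scores): the call-boundary conversion of the association list to a Python dict (shared by both ports)
def pvDictOf (scores : List (String × Int)) : PySem.Dict String Int :=
  scores.foldl (fun d kv => d.insert kv.1 kv.2) PySem.Dict.empty

def pick_closest_label (scores : List (String × Int)) : String :=
  let d := pvDictOf scores
  -- scores = {k: v for k, v in scores.items() if k in ALLOWED_LABELS}
  let filtered := d.items.foldl
    (fun acc kv => if ALLOWED_LABELS.contains kv.1 then acc.insert kv.1 kv.2 else acc)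
    (PySem.Dict.empty : PySem.Dict String Int)
  match PySem.List.max? filtered.items (fun kv => kv.2) with
  | none => ""   -- max() on an empty dict raises ValueError: excluded by Pre_
  | some (best_label, best_score) =>
    if best_score == 0 then "using_computer"
    else
      let specificity_order : List String := ["video_call", "phone_use", "eating_drinking", "meeting", "using_computer"]
      let tied := filtered.items.foldl
        (fun acc kv => if kv.2 == best_score then acc ++ [kv.1] else acc) ([] : List String)
      match specificity_order.find? (fun lab => tied.contains lab) with
      | some lab => lab
      | none => best_label

-- ===== PORT B =====
def SPECIFICITY_ORDER : List String := ["video_call", "phone_use", "eating_drinking", "meeting", "using_computer"]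

-- PRIORITY = {lab: i for i, lab in enumerate(SPECIFICITY_ORDER)}
def PRIORITY : PySem.Dict String Int :=
  (PySem.List.enumerate SPECIFICITY_ORDER).foldl (fun d p => d.insert p.2 p.1) PySem.Dict.empty

def pick_closest_label_alt (scores : List (String × Int)) : String :=
  let d := pvDictOf scores
  -- filtered = {k: v for k, v in scores.items() if k in ALLOWED_LABELS}
  let filtered := d.items.foldl
    (fun acc kv => if ALLOWED_LABELS.contains kv.1 then acc.insert kv.1 kv.2 else acc)
    (PySem.Dict.empty : PySem.Dict String Int)
  -- max(..., key=lambda kv: (kv[1], -PRIORITY[kv[0]])); PRIORITY[kv[0]] never misses (keys were filtered), so getD 0 is exact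
  match PySem.List.max2? filtered.items (fun kv => kv.2) (fun kv => -((PRIORITY.get? kv.1).getD 0)) with
  | none => ""   -- max() on an empty dict raises ValueError: excluded by Pre_
  | some (best_label, best_score) =>
    if best_score == 0 then "using_computer" else best_label

-- ===== PRECONDITION & SPEC =====
-- Pre_ excludes exactly the inputs with no allowed label, on which Python's max() raises ValueError in both A and B.
def Pre_pick_closest_label (scores : List (String × Int)) : Prop :=
  ∃ kv ∈ scores, kv.1 ∈ ALLOWED_LABELS
instance (scores : List (String × Int)) : Decidable (Pre_pick_closest_label scores) := by
  unfold Pre_pick_closest_label; infer_instance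
def pvWitness_pick_closest_label : (List (String × Int)) := ([("meeting", 1)])

def Spec_pick_closest_label (scores : List (String × Int)) (out : String) : Prop := out = pick_closest_label_alt scores
instance (scores : List (String × Int)) (out : String) : Decidable (Spec_pick_closest_label scores out) := by unfold Spec_pick_closest_label; infer_instance

-- ===== CLAIM (what is proved, stated in full; the proofs are below) =====
def Claim_equal_pick_closest_label : Prop := ∀ (scores : List (String × Int)), Dom_pick_closest_label scores → Pre_pick_closest_label scores → Spec_pick_closest_label scores (pick_closest_label scores)

-- ===== LEMMAS AND PROOFS =====

-- fold function of PySem.List.max2? (copied verbatim from its definition)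
def pvF {α : Type} (k1 k2 : α → Int) : Option α → α → Option α :=
  fun acc x =>
    match acc with
    | none => some x
    | some m =>
      if (decide (k1 m < k1 x) || !decide (k1 x < k1 m) && decide (k2 m < k2 x)) = true then some x else some m

lemma pv_max2_eq_foldl {α : Type} (k1 k2 : α → Int) (xs : List α) :
    PySem.List.max2? xs k1 k2 = xs.foldl (pvF k1 k2) none := rfl

lemma pvF_some {α : Type} (k1 k2 : α → Int) (a x : α) :
    pvF k1 k2 (some a) x = if k1 a < k1 x ∨ (¬ k1 x < k1 a ∧ k2 a < k2 x) then some x else some a := by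
  simp only [pvF]
  by_cases h1 : k1 a < k1 x <;> by_cases h2 : k1 x < k1 a <;> by_cases h3 : k2 a < k2 x <;>
    simp [h1, h2, h3]

-- the first-extremal max with a lexicographic two-part key: membership and both bounds, accumulator generalized
lemma pv_go {α : Type} (k1 k2 : α → Int) :
    ∀ (t : List α) (a : α),
    ∃ m, t.foldl (pvF k1 k2) (some a) = some m ∧ (m = a ∨ m ∈ t) ∧
      (k1 a ≤ k1 m ∧ (k1 a = k1 m → k2 a ≤ k2 m)) ∧
      (∀ y ∈ t, k1 y ≤ k1 m ∧ (k1 y = k1 m → k2 y ≤ k2 m)) := by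
  intro t
  induction t with
  | nil =>
      intro a
      exact ⟨a, rfl, Or.inl rfl, ⟨le_refl _, fun _ => le_refl _⟩, by simp⟩
  | cons x t' ih =>
      intro a
      have hfold : (x :: t').foldl (pvF k1 k2) (some a)
          = t'.foldl (pvF k1 k2) (pvF k1 k2 (some a) x) := rfl
      by_cases hc : k1 a < k1 x ∨ (¬ k1 x < k1 a ∧ k2 a < k2 x)
      · obtain ⟨m, hm, hmem, hax, hall⟩ := ih x
        refine ⟨m, ?_, ?_, ?_, ?_⟩
        · rw [hfold, pvF_some, if_pos hc]; exact hm
        · rcases hmem with h' | h' <;> simp [h']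
        · have hxm1 : k1 x ≤ k1 m := hax.1
          constructor
          · rcases hc with h | ⟨h1, h2⟩
            · omega
            · have : k1 a ≤ k1 x := by omega
              omega
          · intro he
            rcases hc with h | ⟨h1, h2⟩
            · omega
            · have hx : k1 x = k1 m := by omega
              exact le_trans (le_of_lt h2) (hax.2 hx)
        · intro y hy
          rcases List.mem_cons.1 hy with h | hy
          · subst h; exact hax
          · exact hall _ hy
      · obtain ⟨m, hm, hmem, hax, hall⟩ := ih a
        have h1 : ¬ k1 a < k1 x := fun h => hc (Or.inl h)
        refine ⟨m, ?_, ?_, hax, ?_⟩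
        · rw [hfold, pvF_some, if_neg hc]; exact hm
        · rcases hmem with h' | h' <;> simp [h']
        · intro y hy
          rcases List.mem_cons.1 hy with h | hy
          · rw [h]
            have hxa : k1 x ≤ k1 a := by omega
            have ham : k1 a ≤ k1 m := hax.1
            constructor
            · omega
            · intro he
              have hax1 : k1 a = k1 m := by omega
              have hxa1 : ¬ k1 x < k1 a := by omega
              have h2 : ¬ k2 a < k2 x := fun h => hc (Or.inr ⟨hxa1, h⟩)
              have := hax.2 hax1
              omega
          · exact hall _ hy

-- every key of the filtered dict passed the ALLOWED_LABELS test
lemma pv_filtered_allowed :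
    ∀ (l : List (String × Int)) (acc : PySem.Dict String Int),
    (∀ p ∈ acc.items, ALLOWED_LABELS.contains p.1 = true) →
    ∀ p ∈ (l.foldl (fun acc kv => if ALLOWED_LABELS.contains kv.1 then acc.insert kv.1 kv.2 else acc) acc).items,
      ALLOWED_LABELS.contains p.1 = true := by
  intro l
  induction l with
  | nil => intro acc hacc p hp; exact hacc p hp
  | cons kv l' ih =>
      intro acc hacc p hp
      simp only [List.foldl] at hp
      by_cases hc : ALLOWED_LABELS.contains kv.1 = true
      · rw [if_pos hc] at hp
        refine ih _ ?_ p hp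
        intro q hq
        rcases (PySem.Dict.mem_items_insert _ _ _ _).1 hq with h | ⟨h, _⟩
        · rw [h]; exact hc
        · exact hacc q h
      · rw [if_neg hc] at hp
        exact ih _ hacc p hp

lemma pv_insert_items_ne_nil (d : PySem.Dict String Int) (k : String) (v : Int) :
    (d.insert k v).items ≠ [] := by
  intro h
  have hmem : (k, v) ∈ (d.insert k v).items := PySem.Dict.mem_items_insert_self _ _ _
  rw [h] at hmem
  exact absurd hmem (List.not_mem_nil)

-- the filter-insert loop yields a nonempty dict as soon as one pair passes the test
lemma pv_fold_ne_nil :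
    ∀ (l : List (String × Int)) (acc : PySem.Dict String Int),
    ((∃ kv ∈ l, ALLOWED_LABELS.contains kv.1 = true) ∨ acc.items ≠ []) →
    ((l.foldl (fun acc kv => if ALLOWED_LABELS.contains kv.1 then acc.insert kv.1 kv.2 else acc) acc).items ≠ []) := by
  intro l
  induction l with
  | nil =>
      intro acc h
      rcases h with ⟨kv, hkv, _⟩ | h
      · exact absurd hkv (List.not_mem_nil)
      · exact h
  | cons kv l' ih =>
      intro acc h
      simp only [List.foldl]
      by_cases hc : ALLOWED_LABELS.contains kv.1 = true
      · rw [if_pos hc]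
        exact ih _ (Or.inr (pv_insert_items_ne_nil _ _ _))
      · rw [if_neg hc]
        apply ih
        rcases h with ⟨kv', hkv', hc'⟩ | h
        · rcases List.mem_cons.1 hkv' with h' | h'
          · rw [h'] at hc'; exact absurd hc' hc
          · exact Or.inl ⟨kv', h', hc'⟩
        · exact Or.inr h
  
-- under Pre_, the filtered dict is nonempty
lemma pv_filtered_ne_nil (scores : List (String × Int)) (hpre : Pre_pick_closest_label scores) :
    ((pvDictOf scores).items.foldl
      (fun acc kv => if ALLOWED_LABELS.contains kv.1 then acc.insert kv.1 kv.2 else acc)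
      (PySem.Dict.empty : PySem.Dict String Int)).items ≠ [] := by
  obtain ⟨⟨k, v⟩, hmem, hallow⟩ := hpre
  have hkeyd : k ∈ (pvDictOf scores).keys := by
    unfold pvDictOf
    rw [PySem.Dict.keys_foldl_insert_key scores (fun kv => kv.1) (fun _ kv => kv.2)]
    rw [show (PySem.Dict.empty : PySem.Dict String Int).keys = [] from rfl]
    rw [PySem.Set.update_nil_left]
    rw [PySem.Set.mem_ofList]
    exact List.mem_map.2 ⟨(k, v), hmem, rfl⟩
  have hitems : ∃ v', (k, v') ∈ (pvDictOf scores).items := by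
    simp only [PySem.Dict.keys, List.mem_map] at hkeyd
    obtain ⟨p, hp, hpk⟩ := hkeyd
    exact ⟨p.2, by rwa [show (k, p.2) = p from by rw [← hpk]]⟩
  obtain ⟨v', hv'⟩ := hitems
  exact pv_fold_ne_nil _ _ (Or.inl ⟨(k, v'), hv', by simpa [List.contains_iff_mem] using hallow⟩)

-- concrete priorities
lemma pv_p_vc : ((PRIORITY.get? "video_call").getD 0 : Int) = 0 := by decide
lemma pv_p_pu : ((PRIORITY.get? "phone_use").getD 0 : Int) = 1 := by decide
lemma pv_p_ed : ((PRIORITY.get? "eating_drinking").getD 0 : Int) = 2 := by decide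
lemma pv_p_me : ((PRIORITY.get? "meeting").getD 0 : Int) = 3 := by decide
lemma pv_p_uc : ((PRIORITY.get? "using_computer").getD 0 : Int) = 4 := by decide

-- the post-filter computations of the two ports agree on any nonempty list of allowed-keyed pairs
lemma pv_core (L : List (String × Int)) (hne : L ≠ [])
    (hall : ∀ kv ∈ L, ALLOWED_LABELS.contains kv.1 = true) :
    (match PySem.List.max? L (fun kv => kv.2) with
     | none => ""
     | some (best_label, best_score) =>
       if best_score == 0 then "using_computer"
       else
         let specificity_order : List String := ["video_call", "phone_use", "eating_drinking", "meeting", "using_computer"]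
         let tied := L.foldl (fun acc kv => if kv.2 == best_score then acc ++ [kv.1] else acc) ([] : List String)
         match specificity_order.find? (fun lab => tied.contains lab) with
         | some lab => lab
         | none => best_label)
    = (match PySem.List.max2? L (fun kv => kv.2) (fun kv => -((PRIORITY.get? kv.1).getD 0)) with
       | none => ""
       | some (best_label, best_score) =>
         if best_score == 0 then "using_computer" else best_label) := by
  cases L with
  | nil => exact absurd rfl hne
  | cons hd t =>
    -- A's max
    obtain ⟨p, hp⟩ : ∃ p, PySem.List.max? (hd :: t) (fun kv : String × Int => kv.2) = some p := by
      cases hmx : PySem.List.max? (hd :: t) (fun kv : String × Int => kv.2) with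
      | none => exact absurd ((PySem.List.max?_eq_none_iff _ _).1 hmx) (by simp)
      | some p => exact ⟨p, rfl⟩
    obtain ⟨bl, bs⟩ := p
    have hpmem : (bl, bs) ∈ hd :: t := PySem.List.max?_mem hp
    have hub : ∀ y ∈ hd :: t, y.2 ≤ bs := fun y hy => PySem.List.max?_isMax hp y hy
    -- B's max
    obtain ⟨m, hm, hmem', hah, hallt⟩ :=
      pv_go (fun kv : String × Int => kv.2) (fun kv : String × Int => -((PRIORITY.get? kv.1).getD 0)) t hd
    have hm2 : PySem.List.max2? (hd :: t) (fun kv : String × Int => kv.2)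
        (fun kv : String × Int => -((PRIORITY.get? kv.1).getD 0)) = some m := by
      rw [pv_max2_eq_foldl]
      exact hm
    have hmmem : m ∈ hd :: t := by
      rcases hmem' with h | h
      · rw [h]; exact List.mem_cons_self
      · exact List.mem_cons_of_mem _ h
    have hub2 : ∀ y ∈ hd :: t, y.2 ≤ m.2 := by
      intro y hy
      rcases List.mem_cons.1 hy with h | h
      · rw [h]; exact hah.1
      · exact (hallt y h).1
    have htie2 : ∀ y ∈ hd :: t, y.2 = m.2 → -((PRIORITY.get? y.1).getD 0) ≤ -((PRIORITY.get? m.1).getD 0) := by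
      intro y hy he
      rcases List.mem_cons.1 hy with h | h
      · rw [h]; rw [h] at he; exact hah.2 he
      · exact (hallt y h).2 he
    have hbs : m.2 = bs := le_antisymm (hub m hmmem) (hub2 (bl, bs) hpmem)
    obtain ⟨ml, ms⟩ := m
    rw [hp, hm2]
    simp only []
    by_cases hz : bs = 0
    · simp only [hz] at hbs ⊢
      simp [hbs]
    · have hms : (ms == (0:Int)) = false := by simp_all
      have hbs0 : (bs == (0:Int)) = false := by simp [hz]
      rw [if_neg (by simp [hz]), if_neg (by simp_all)]
      -- characterize tied
      have htied_eq : (hd :: t).foldl (fun acc kv => if kv.2 == bs then acc ++ [kv.1] else acc) ([] : List String)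
          = ((hd :: t).filter (fun kv => kv.2 == bs)).map (fun kv => kv.1) := by
        rw [PySem.List.foldl_append_if (fun kv : String × Int => kv.2 == bs) (fun kv => kv.1)]
        simp
      set tied := (hd :: t).foldl (fun acc kv => if kv.2 == bs then acc ++ [kv.1] else acc) ([] : List String) with htd
      have htied : ∀ lab : String, lab ∈ tied ↔ ∃ kv ∈ hd :: t, kv.2 = bs ∧ kv.1 = lab := by
        intro lab
        rw [htied_eq]
        simp only [List.mem_map, List.mem_filter, beq_iff_eq]
        constructor
        · rintro ⟨kv, ⟨h1, h2⟩, h3⟩; exact ⟨kv, h1, h2, h3⟩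
        · rintro ⟨kv, h1, h2, h3⟩; exact ⟨kv, ⟨h1, h2⟩, h3⟩
      have hml_tied : ml ∈ tied := (htied ml).2 ⟨(ml, ms), hmmem, by simpa using hbs, rfl⟩
      have hbl_tied : bl ∈ tied := (htied bl).2 ⟨(bl, bs), hpmem, rfl, rfl⟩
      have hml_allowed : ml ∈ ALLOWED_LABELS := by
        have := hall (ml, ms) hmmem
        simpa [List.contains_iff_mem] using this
      have hbl_allowed : bl ∈ ALLOWED_LABELS := by
        have := hall (bl, bs) hpmem
        simpa [List.contains_iff_mem] using this
      have hmin : ∀ lab ∈ tied, ((PRIORITY.get? ml).getD 0 : Int) ≤ (PRIORITY.get? lab).getD 0 := by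
        intro lab hlab
        obtain ⟨kv, hkv, hv, hk⟩ := (htied lab).1 hlab
        have h1 := htie2 kv hkv (by simp [hv, ← hbs])
        rw [hk] at h1
        have h2 : -((PRIORITY.get? lab).getD 0 : Int) ≤ -((PRIORITY.get? ml).getD 0) := by
          simpa using h1
        omega
      have hml5 : ml = "meeting" ∨ ml = "phone_use" ∨ ml = "eating_drinking" ∨ ml = "video_call" ∨ ml = "using_computer" := by
        simpa [ALLOWED_LABELS] using hml_allowed
      have hbl5 : bl = "meeting" ∨ bl = "phone_use" ∨ bl = "eating_drinking" ∨ bl = "video_call" ∨ bl = "using_computer" := by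
        simpa [ALLOWED_LABELS] using hbl_allowed
      by_cases t0 : "video_call" ∈ tied
      · rw [List.find?_cons_of_pos (by simpa [List.contains_iff_mem] using t0)]
        have hq := hmin _ t0
        rw [pv_p_vc] at hq
        rcases hml5 with rfl | rfl | rfl | rfl | rfl
        · rw [pv_p_me] at hq; omega
        · rw [pv_p_pu] at hq; omega
        · rw [pv_p_ed] at hq; omega
        · rfl
        · rw [pv_p_uc] at hq; omega
      · rw [List.find?_cons_of_neg (by simpa [List.contains_iff_mem] using t0)]
        by_cases t1 : "phone_use" ∈ tied
        · rw [List.find?_cons_of_pos (by simpa [List.contains_iff_mem] using t1)]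
          have hq := hmin _ t1
          rw [pv_p_pu] at hq
          rcases hml5 with rfl | rfl | rfl | rfl | rfl
          · rw [pv_p_me] at hq; omega
          · rfl
          · rw [pv_p_ed] at hq; omega
          · exact absurd hml_tied t0
          · rw [pv_p_uc] at hq; omega
        · rw [List.find?_cons_of_neg (by simpa [List.contains_iff_mem] using t1)]
          by_cases t2 : "eating_drinking" ∈ tied
          · rw [List.find?_cons_of_pos (by simpa [List.contains_iff_mem] using t2)]
            have hq := hmin _ t2
            rw [pv_p_ed] at hq
            rcases hml5 with rfl | rfl | rfl | rfl | rfl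
            · rw [pv_p_me] at hq; omega
            · exact absurd hml_tied t1
            · rfl
            · exact absurd hml_tied t0
            · rw [pv_p_uc] at hq; omega
          · rw [List.find?_cons_of_neg (by simpa [List.contains_iff_mem] using t2)]
            by_cases t3 : "meeting" ∈ tied
            · rw [List.find?_cons_of_pos (by simpa [List.contains_iff_mem] using t3)]
              have hq := hmin _ t3
              rw [pv_p_me] at hq
              rcases hml5 with rfl | rfl | rfl | rfl | rfl
              · rfl
              · exact absurd hml_tied t1
              · exact absurd hml_tied t2
              · exact absurd hml_tied t0
              · rw [pv_p_uc] at hq; omega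
            · rw [List.find?_cons_of_neg (by simpa [List.contains_iff_mem] using t3)]
              have t4 : "using_computer" ∈ tied := by
                rcases hbl5 with rfl | rfl | rfl | rfl | rfl
                · exact absurd hbl_tied t3
                · exact absurd hbl_tied t1
                · exact absurd hbl_tied t2
                · exact absurd hbl_tied t0
                · exact hbl_tied
              rw [List.find?_cons_of_pos (by simpa [List.contains_iff_mem] using t4)]
              rcases hml5 with rfl | rfl | rfl | rfl | rfl
              · exact absurd hml_tied t3
              · exact absurd hml_tied t1
              · exact absurd hml_tied t2
              · exact absurd hml_tied t0
              · rfl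

-- ===== VERDICT (by name: the statement is the Claim_ definition above) =====
theorem pick_closest_label_spec : Claim_equal_pick_closest_label := by
  intro scores _ hpre
  unfold Spec_pick_closest_label pick_closest_label pick_closest_label_alt
  exact pv_core _ (pv_filtered_ne_nil scores hpre)
    (pv_filtered_allowed _ _ (fun p hp => absurd hp (List.not_mem_nil)))
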